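-- pv_equiv track=rewrite | github.com/QuickRecon/DiveCANHead | Firmware/tests/integration/harness/test_pid_stability.py | _count_setpoint_crossings
-- ===== SOURCE A (Python) =====
-- def _count_setpoint_crossings(samples: list[int], setpoint_cb: int) -> int:
--     """Count zero-crossings of (sample − setpoint) over the trace."""
--     crossings = 0
--     prev_sign = 0
--     for v in samples:
--         diff = v - setpoint_cb
--         sign = (1 if diff > 0 else (-1 if diff < 0 else 0))
--         if sign != 0 and prev_sign != 0 and sign != prev_sign:
--             crossings += 1
--         if sign != 0:
--             prev_sign = sign
--     return crossings
-- ===== SOURCE B (Python) =====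
-- def _count_setpoint_crossings(samples: list[int], setpoint_cb: int) -> int:
--     """Count zero-crossings of (sample - setpoint) over the trace.
--
--     Divide and conquer: each segment is summarised by a triple
--     (crossings, first_nonzero_sign, last_nonzero_sign); two summaries merge
--     in O(1), adding one crossing when the halves meet with opposite signs.
--     """
--     def solve(seg):
--         n = len(seg)
--         if n == 0:
--             return (0, 0, 0)
--         if n == 1:
--             v = seg[0]
--             s = 1 if v > setpoint_cb else (-1 if v < setpoint_cb else 0)
--             return (0, s, s)
--         mid = n // 2
--         cl, fl, ll = solve(seg[:mid])
--         cr, fr, lr = solve(seg[mid:])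
--         c = cl + cr + (1 if ll != 0 and fr != 0 and ll != fr else 0)
--         first = fl if fl != 0 else fr
--         last = lr if lr != 0 else ll
--         return (c, first, last)
--     return solve(samples)[0]
-- ===== Notes on version B (the rewrite author's own statement) =====
-- stated objective: alternative
-- what changed: replaces A's single fused loop carrying (crossings, prev_sign) state with a divide-and-conquer recursion that summarises each half of the trace as (crossings, first nonzero sign, last nonzero sign) and merges the two summaries in O(1)
import Mathlib
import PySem

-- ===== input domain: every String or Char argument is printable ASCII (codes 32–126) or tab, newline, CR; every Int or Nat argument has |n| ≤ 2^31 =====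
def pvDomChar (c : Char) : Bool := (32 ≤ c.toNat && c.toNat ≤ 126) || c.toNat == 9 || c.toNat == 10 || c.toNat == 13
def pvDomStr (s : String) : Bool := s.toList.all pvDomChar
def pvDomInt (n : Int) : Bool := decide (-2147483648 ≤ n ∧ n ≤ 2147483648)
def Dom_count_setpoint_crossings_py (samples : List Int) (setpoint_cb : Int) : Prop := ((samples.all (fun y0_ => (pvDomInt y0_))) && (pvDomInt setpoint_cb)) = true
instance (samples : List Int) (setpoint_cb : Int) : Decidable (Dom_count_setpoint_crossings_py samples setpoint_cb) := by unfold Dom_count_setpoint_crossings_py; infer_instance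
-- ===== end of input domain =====

-- B replaces A's fused loop carrying (crossings, prev_sign) with a
-- divide-and-conquer recursion merging (crossings, first sign, last sign)
-- summaries of the two halves; objective: alternative (same cost class).


-- ===== PORT A =====
-- one step of A's loop body over the state (crossings, prev_sign)
def pvAStep (setpoint_cb : Int) (st : Int × Int) (v : Int) : Int × Int :=
  let diff := v - setpoint_cb
  let sign : Int := if diff > 0 then 1 else (if diff < 0 then -1 else 0)
  let crossings := if sign ≠ 0 ∧ st.2 ≠ 0 ∧ sign ≠ st.2 then st.1 + 1 else st.1
  let prev_sign := if sign ≠ 0 then sign else st.2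
  (crossings, prev_sign)

def count_setpoint_crossings_py (samples : List Int) (setpoint_cb : Int) : Int :=
  (samples.foldl (pvAStep setpoint_cb) (0, 0)).1

-- ===== PORT B =====
-- Source B's inner `solve`: summary (crossings, first nonzero sign, last nonzero
-- sign) of a segment, computed by splitting it in half and merging the two
-- summaries (0 marks "no nonzero sign in this segment").
def pvSolveB (sp : Int) (seg : List Int) : Int × Int × Int :=
  match seg with
  | [] => (0, 0, 0)
  | [v] =>
      let s : Int := if v > sp then 1 else (if v < sp then -1 else 0)
      (0, s, s)
  | a :: b :: t =>
      let n := (a :: b :: t).length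
      let mid := n / 2
      let l := pvSolveB sp ((a :: b :: t).take mid)
      let r := pvSolveB sp ((a :: b :: t).drop mid)
      let c := l.1 + r.1 + (if l.2.2 ≠ 0 ∧ r.2.1 ≠ 0 ∧ l.2.2 ≠ r.2.1 then 1 else 0)
      let first := if l.2.1 ≠ 0 then l.2.1 else r.2.1
      let last := if r.2.2 ≠ 0 then r.2.2 else l.2.2
      (c, first, last)
termination_by seg.length
decreasing_by
  · simp [List.length_take]; omega
  · simp; omega

def count_setpoint_crossings_py_alt (samples : List Int) (setpoint_cb : Int) : Int :=
  (pvSolveB setpoint_cb samples).1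

-- ===== PRECONDITION & SPEC =====
def Spec_count_setpoint_crossings_py (samples : List Int) (setpoint_cb : Int) (out : Int) : Prop := out = count_setpoint_crossings_py_alt samples setpoint_cb
instance (samples : List Int) (setpoint_cb : Int) (out : Int) : Decidable (Spec_count_setpoint_crossings_py samples setpoint_cb out) := by unfold Spec_count_setpoint_crossings_py; infer_instance

-- ===== CLAIM (what is proved, stated in full; the proofs are below) =====
def Claim_equal_count_setpoint_crossings_py : Prop := ∀ (samples : List Int) (setpoint_cb : Int), Dom_count_setpoint_crossings_py samples setpoint_cb → Spec_count_setpoint_crossings_py samples setpoint_cb (count_setpoint_crossings_py samples setpoint_cb)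

-- ===== LEMMAS AND PROOFS =====

-- adjacent-unequal-pair count of a sign list (proof-side characterisation)
def pvAdj : List Int → Int
  | a :: b :: t => (if a ≠ b then 1 else 0) + pvAdj (b :: t)
  | _ => 0

-- the filtered nonzero-sign trace
def pvSigns (setpoint_cb : Int) (samples : List Int) : List Int :=
  samples.filterMap (fun v =>
    if v ≠ setpoint_cb then some (if v > setpoint_cb then (1 : Int) else -1) else none)

-- prefix representing the prev_sign state: empty if 0, else the sign itself
def pvPfx (p : Int) : List Int := if p = 0 then [] else [p]

lemma pvAdj_pfx (p s : Int) (t : List Int) (hs : s ≠ 0) :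
    pvAdj (pvPfx p ++ s :: t)
      = (if s ≠ 0 ∧ p ≠ 0 ∧ s ≠ p then 1 else 0) + pvAdj (s :: t) := by
  by_cases hp : p = 0
  · simp [pvPfx, hp, hs]
  · simp only [pvPfx, hp, if_neg, List.cons_append, List.nil_append, pvAdj, hs,
      ne_eq, not_false_iff, true_and]
    by_cases hsp : s = p
    · simp [hsp]
    · have h1 : ¬ p = s := fun h => hsp h.symm
      simp [hsp, h1]

-- A's fold invariant against the filtered sign list
lemma aFold_eq (setpoint_cb : Int) (samples : List Int) (c p : Int) :
    (samples.foldl (pvAStep setpoint_cb) (c, p)).1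
      = c + pvAdj (pvPfx p ++ pvSigns setpoint_cb samples) := by
  induction samples generalizing c p with
  | nil =>
    by_cases hp : p = 0 <;> simp [pvPfx, hp, pvSigns, pvAdj]
  | cons v t ih =>
    simp only [List.foldl_cons]
    by_cases hv : v = setpoint_cb
    · have hsz : ¬ (v - setpoint_cb > 0) ∧ ¬ (v - setpoint_cb < 0) := by omega
      simp [pvAStep, pvSigns, hv, ih]
    · set s : Int := if v > setpoint_cb then (1 : Int) else -1 with hsdef
      have hsne : s ≠ 0 := by rw [hsdef]; split_ifs <;> simp
      have hsigns : pvSigns setpoint_cb (v :: t) = s :: pvSigns setpoint_cb t := by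
        simp [pvSigns, hv, hsdef]
      rw [hsigns, pvAdj_pfx p s _ hsne]
      have hstep : pvAStep setpoint_cb (c, p) v
          = ((if s ≠ 0 ∧ p ≠ 0 ∧ s ≠ p then c + 1 else c), s) := by
        by_cases hvs : v > setpoint_cb
        · have h1 : v - setpoint_cb > 0 := by omega
          simp [pvAStep, hsdef, hvs]
        · have h1 : ¬ (v - setpoint_cb > 0) := by omega
          have h2 : v - setpoint_cb < 0 := by omega
          simp [pvAStep, h2, hsdef, hvs]
      rw [hstep, ih]
      have : pvPfx s = [s] := by simp [pvPfx, hsne]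
      rw [this]
      simp only [List.singleton_append]
      split_ifs <;> ring

-- every filtered sign is nonzero
lemma pvSigns_ne_zero (sp : Int) (l : List Int) : ∀ x ∈ pvSigns sp l, x ≠ 0 := by
  intro x hx
  simp only [pvSigns, List.mem_filterMap] at hx
  obtain ⟨v, _, hv⟩ := hx
  by_cases h : v = sp <;> simp [h] at hv
  split_ifs at hv <;> omega

-- pvAdj over an append: count each half plus the junction
lemma pvAdj_append (X Y : List Int) :
    pvAdj (X ++ Y)
      = pvAdj X + pvAdj Y
        + (if X ≠ [] ∧ Y ≠ [] ∧ X.getLastD 0 ≠ Y.headD 0 then 1 else 0) := by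
  induction X with
  | nil => simp [pvAdj]
  | cons x xs ih =>
    cases xs with
    | nil =>
      cases Y with
      | nil => simp [pvAdj]
      | cons y t =>
        simp [pvAdj]
        split_ifs <;> simp_all <;> ring
    | cons x2 xs2 =>
      simp only [List.cons_append, pvAdj] at *
      rw [ih]
      have hg : (x :: x2 :: xs2).getLastD 0 = (x2 :: xs2).getLastD 0 := by simp
      simp only [hg]
      split_ifs <;> simp_all <;> ring
  
-- headD 0 / getLastD 0 of a nonzero-element list detect emptiness
lemma headD_ne_zero (sp : Int) (l : List Int) :
    pvSigns sp l ≠ [] ↔ (pvSigns sp l).headD 0 ≠ 0 := by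
  cases h : pvSigns sp l with
  | nil => simp
  | cons a t =>
    have : a ≠ 0 := pvSigns_ne_zero sp l a (by rw [h]; exact List.mem_cons_self ..)
    simp [this]

lemma getLastD_ne_zero (sp : Int) (l : List Int) :
    pvSigns sp l ≠ [] ↔ (pvSigns sp l).getLastD 0 ≠ 0 := by
  cases h : pvSigns sp l with
  | nil => simp
  | cons a t =>
    have hm : (a :: t).getLastD 0 ∈ a :: t := by
      rw [List.getLastD_eq_getLast?]
      cases hl : (a :: t).getLast? with
      | none => simp at hl
      | some x => simpa using List.mem_of_getLast? hl
    have : (a :: t).getLastD 0 ≠ 0 := pvSigns_ne_zero sp l _ (by rw [h]; exact hm)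
    rw [List.getLastD_eq_getLast?] at this
    simp [this]

lemma pvSigns_append (sp : Int) (X Y : List Int) :
    pvSigns sp (X ++ Y) = pvSigns sp X ++ pvSigns sp Y := by
  simp [pvSigns]

-- the divide-and-conquer summary equals (pvAdj, headD 0, getLastD 0) of the sign list
lemma pvSolveB_eq (sp : Int) (seg : List Int) :
    pvSolveB sp seg
      = (pvAdj (pvSigns sp seg), (pvSigns sp seg).headD 0, (pvSigns sp seg).getLastD 0) := by
  induction seg using pvSolveB.induct sp with
  | case1 =>
    simp [pvSolveB, pvSigns, pvAdj]
  | case2 v =>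
    by_cases hv : v = sp
    · have h0 : pvSigns sp [v] = [] := by simp [pvSigns, hv]
      have h1 : ¬ v > sp := by omega
      have h2 : ¬ v < sp := by omega
      simp [pvSolveB, h0, pvAdj, h1, h2]
    · by_cases hgt : v > sp
      · have : pvSigns sp [v] = [1] := by simp [pvSigns, hv, hgt]
        have hlt : ¬ v < sp := by omega
        simp [pvSolveB, this, pvAdj, hgt, hlt]
      · have hlt : v < sp := by omega
        have : pvSigns sp [v] = [-1] := by simp [pvSigns, hv, hgt]
        simp [pvSolveB, this, pvAdj, hgt, hlt]
  | case3 a b t n mid ihl ihr =>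
    have hm2 : mid = (a :: b :: t).length / 2 := rfl
    rw [hm2] at ihl ihr
    simp only [pvSolveB]
    rw [ihl, ihr]
    have hsplit : (a :: b :: t).take ((a :: b :: t).length / 2)
        ++ (a :: b :: t).drop ((a :: b :: t).length / 2) = a :: b :: t :=
      List.take_append_drop _ _
    set L := (a :: b :: t).take ((a :: b :: t).length / 2) with hL
    set R := (a :: b :: t).drop ((a :: b :: t).length / 2) with hR
    have hS : pvSigns sp (a :: b :: t) = pvSigns sp L ++ pvSigns sp R := by
      rw [← hsplit, pvSigns_append]
    simp only [hS]
    refine Prod.ext ?_ (Prod.ext ?_ ?_)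
    · -- crossings
      simp only [pvAdj_append]
      have h1 := (getLastD_ne_zero sp L)
      have h2 := (headD_ne_zero sp R)
      by_cases e1 : pvSigns sp L = [] <;> by_cases e2 : pvSigns sp R = [] <;>
        (simp_all; try ring)
    · -- first
      by_cases e1 : pvSigns sp L = []
      · have := (headD_ne_zero sp L).not
        simp_all
      · have hne := (headD_ne_zero sp L).mp e1
        cases hC : pvSigns sp L with
        | nil => exact absurd hC e1
        | cons c cs => simp_all
    · -- last
      by_cases e2 : pvSigns sp R = []
      · have := (getLastD_ne_zero sp R).not
        simp_all
      · have hne := (getLastD_ne_zero sp R).mp e2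
        cases hC : pvSigns sp R using List.reverseRecOn with
        | nil => exact absurd hC e2
        | append_singleton cs c => simp_all

-- ===== VERDICT (by name: the statement is the Claim_ definition above) =====
theorem count_setpoint_crossings_py_spec : Claim_equal_count_setpoint_crossings_py := by
  intro samples setpoint_cb _
  unfold Spec_count_setpoint_crossings_py count_setpoint_crossings_py count_setpoint_crossings_py_alt
  rw [aFold_eq, pvSolveB_eq]
  simp [pvPfx]
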